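-- pv_equiv track=rewrite | github.com/Shubham-Choudhury/GeeksforGeeks-Problems | 2025/07 July/15 Divisible by 13/main.py | divBy13
-- ===== SOURCE A (Python) =====
-- def divBy13(s):
--     length = len(s)
--
--     if length == 1 and s[0] == "0":
--         return True
--
--     if length % 3 == 1:
--         s += "00"
--         length += 2
--     elif length % 3 == 2:
--         s += "0"
--         length += 1
--
--     sum_ = 0
--     p = 1
--
--     i = length - 1
--     while i >= 0:
--         group = 0
--         group += int(s[i])
--         i -= 1
--         group += int(s[i]) * 10
--         i -= 1
--         group += int(s[i]) * 100
--         i -= 1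
--
--         sum_ += group * p
--         p *= -1
--
--     sum_ = abs(sum_)
--     return sum_ % 13 == 0
-- ===== SOURCE B (Python) =====
-- def divBy13(s):
--     r = 0
--     for c in s:
--         r = (r * 10 + int(c)) % 13
--     return r == 0
-- ===== Notes on version B (the rewrite author's own statement) =====
-- stated objective: simpler
-- what changed: Replaced the zero-padding, 3-digit grouping with alternating signs and final abs by a single left-to-right Horner pass keeping the running remainder mod 13.
import Mathlib
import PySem

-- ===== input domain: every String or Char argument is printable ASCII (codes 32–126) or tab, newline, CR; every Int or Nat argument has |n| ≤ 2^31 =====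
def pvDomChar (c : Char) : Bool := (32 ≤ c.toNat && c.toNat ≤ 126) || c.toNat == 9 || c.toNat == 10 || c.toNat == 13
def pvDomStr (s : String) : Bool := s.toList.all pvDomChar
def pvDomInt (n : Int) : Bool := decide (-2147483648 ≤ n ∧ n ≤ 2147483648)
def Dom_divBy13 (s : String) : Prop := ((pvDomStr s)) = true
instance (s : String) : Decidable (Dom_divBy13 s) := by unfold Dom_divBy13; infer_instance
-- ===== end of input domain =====

-- B replaces the pad/group/alternating-sign scan by a single Horner pass keeping the running remainder mod 13 (simpler).


-- ===== PORT A =====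
-- int(c) for one digit char; exact on Pre_ (digits only — elsewhere Python raises ValueError)
def pvDigit (c : Char) : Int := (c.toNat : Int) - 48

-- the while loop: i walks from the end, consuming three chars per iteration (here: the reversed list, three at a time)
def pvLoopA : List Char → Int → Int → Int
  | c0 :: c1 :: c2 :: rest, sum, p =>
      pvLoopA rest (sum + (pvDigit c0 + pvDigit c1 * 10 + pvDigit c2 * 100) * p) (p * -1)
  | _, sum, _ => sum

def divBy13 (s : String) : Bool :=
  let l := s.toList
  let length := l.length
  if length == 1 && PySem.List.pyGet? l 0 == some '0' then true
  else
    let lp :=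
      if length % 3 == 1 then l ++ ['0', '0']
      else if length % 3 == 2 then l ++ ['0']
      else l
    let sum := pvLoopA lp.reverse 0 1
    |sum| % 13 == 0

-- ===== PORT B =====
def divBy13_alt (s : String) : Bool :=
  (s.toList.foldl (fun r c => (r * 10 + pvDigit c) % 13) 0) == 0

-- ===== PRECONDITION & SPEC =====
-- Pre_ excludes exactly the inputs on which Python A raises ValueError: any string with a non-digit character.
def Pre_divBy13 (s : String) : Prop := s.toList.all Char.isDigit = true
instance (s : String) : Decidable (Pre_divBy13 s) := by unfold Pre_divBy13; infer_instance
def pvWitness_divBy13 : String := "13"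

def Spec_divBy13 (s : String) (out : Bool) : Prop := out = divBy13_alt s
instance (s : String) (out : Bool) : Decidable (Spec_divBy13 s out) := by unfold Spec_divBy13; infer_instance

-- ===== CLAIM =====
def Claim_equal_divBy13 : Prop := ∀ (s : String), Dom_divBy13 s → Pre_divBy13 s → Spec_divBy13 s (divBy13 s)

-- ===== LEMMAS AND PROOFS =====
-- value of a digit string read left to right
def pvVal (l : List Char) : Int := l.foldl (fun a c => a * 10 + pvDigit c) 0

theorem pvVal_append_three (l : List Char) (a b c : Char) :
    pvVal (l ++ [a, b, c]) = pvVal l * 1000 + pvDigit a * 100 + pvDigit b * 10 + pvDigit c := by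
  simp [pvVal, List.foldl_append, List.foldl]; ring

theorem pvVal_append_zero (l : List Char) : pvVal (l ++ ['0']) = pvVal l * 10 := by
  simp [pvVal, List.foldl_append, List.foldl, pvDigit]

-- B's fold is the plain Horner value reduced mod 13
theorem pvFoldB_mod (l : List Char) (r : Int) :
    l.foldl (fun r c => (r * 10 + pvDigit c) % 13) (r % 13) =
      (l.foldl (fun a c => a * 10 + pvDigit c) r) % 13 := by
  induction l generalizing r with
  | nil => simp
  | cons c t ih =>
      simp only [List.foldl]
      have h : (r % 13 * 10 + pvDigit c) % 13 = (r * 10 + pvDigit c) % 13 := by omega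
      rw [h, ← ih]

-- A's alternating group sum is congruent to the value of the (padded) string mod 13
theorem pvLoopA_modEq (r : List Char) (h3 : 3 ∣ r.length) (sum p : Int) :
    pvLoopA r sum p ≡ sum + p * pvVal r.reverse [ZMOD 13] := by
  induction r, sum, p using pvLoopA.induct with
  | case1 c0 c1 c2 rest sum p ih =>
      simp only [pvLoopA]
      have hlen : 3 ∣ rest.length := by simp at h3 ⊢; omega
      have hrev : pvVal (c0 :: c1 :: c2 :: rest).reverse =
          pvVal rest.reverse * 1000 + pvDigit c2 * 100 + pvDigit c1 * 10 + pvDigit c0 := by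
        have : (c0 :: c1 :: c2 :: rest).reverse = rest.reverse ++ [c2, c1, c0] := by simp
        rw [this, pvVal_append_three]
      refine (ih hlen).trans ?_
      rw [hrev, Int.ModEq]
      have : sum + (pvDigit c0 + pvDigit c1 * 10 + pvDigit c2 * 100) * p +
          p * -1 * pvVal rest.reverse -
          (sum + p * (pvVal rest.reverse * 1000 + pvDigit c2 * 100 + pvDigit c1 * 10 + pvDigit c0)) =
          13 * (-(77 * (p * pvVal rest.reverse))) := by ring
      omega
  | case2 l sum' p' hnm =>
      -- fallback: length < 3 and divisible by 3 forces l = []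
      rcases l with _ | ⟨a, _ | ⟨b, _ | ⟨c, t⟩⟩⟩
      · simp [pvLoopA, pvVal, Int.ModEq]
      · simp at h3
      · simp at h3
      · exact (hnm a b c t rfl).elim

theorem pv13_dvd_mul_ten {n : Int} (h : (13 : Int) ∣ n * 10) : (13 : Int) ∣ n := by
  obtain ⟨k, hk⟩ := h; omega

-- both ports compute `13 ∣ pvVal s.toList`
theorem pvB_char (s : String) : divBy13_alt s = decide ((13 : Int) ∣ pvVal s.toList) := by
  unfold divBy13_alt
  have h0 : (0 : Int) = 0 % 13 := by norm_num
  rw [h0, pvFoldB_mod]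
  change (pvVal s.toList % 13 == 0) = _
  have hiff : (13 : Int) ∣ pvVal s.toList ↔ pvVal s.toList % 13 = 0 :=
    Int.dvd_iff_emod_eq_zero
  by_cases h : pvVal s.toList % 13 = 0
  · simp [h, hiff.mpr h]
  · have hnd : ¬ (13 : Int) ∣ pvVal s.toList := fun hd => h (hiff.mp hd)
    simp [h, hnd]

theorem pvA_char (s : String) : divBy13 s = decide ((13 : Int) ∣ pvVal s.toList) := by
  unfold divBy13
  set l := s.toList with hl
  by_cases hsp : l.length == 1 && PySem.List.pyGet? l 0 == some '0'
  · simp only [hsp, if_true]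
    have : l = ['0'] := by
      match l, hsp with
      | [c], h =>
        simp [PySem.List.pyGet?, PySem.List.pyIdx?] at h
        simp [h]
    rw [this]
    simp [pvVal, pvDigit]
  · simp only [hsp, if_false, Bool.false_eq_true]
    -- the padded list and its relation to l
    have key : ∀ lp : List Char, 3 ∣ lp.length → ((13:Int) ∣ pvVal lp → (13:Int) ∣ pvVal l) →
        ((13:Int) ∣ pvVal l → (13:Int) ∣ pvVal lp) →
        (decide (|pvLoopA lp.reverse 0 1| % 13 = 0) = decide ((13 : Int) ∣ pvVal l)) := by
      intro lp hdvd h1 h2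
      have hc := pvLoopA_modEq lp.reverse (by simpa using hdvd) 0 1
      simp only [List.reverse_reverse, zero_add, one_mul] at hc
      have habs : |pvLoopA lp.reverse 0 1| % 13 = 0 ↔ (13:Int) ∣ pvVal lp := by
        rw [← Int.dvd_iff_emod_eq_zero, dvd_abs, Int.dvd_iff_emod_eq_zero, hc,
          ← Int.dvd_iff_emod_eq_zero]
      simp only [decide_eq_decide]
      exact habs.trans ⟨h1, h2⟩
    split_ifs with h1 h2
    · exact key (l ++ ['0', '0']) (by simp at h1 ⊢; omega)
        (by rw [show l ++ ['0','0'] = (l ++ ['0']) ++ ['0'] by simp, pvVal_append_zero,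
              pvVal_append_zero]
            exact fun h => pv13_dvd_mul_ten (pv13_dvd_mul_ten h))
        (by rw [show l ++ ['0','0'] = (l ++ ['0']) ++ ['0'] by simp, pvVal_append_zero,
              pvVal_append_zero]
            exact fun h => (h.mul_right 10).mul_right 10)
    · exact key (l ++ ['0']) (by simp at h2 ⊢; omega)
        (by rw [pvVal_append_zero]; exact pv13_dvd_mul_ten)
        (by rw [pvVal_append_zero]; exact fun h => h.mul_right 10)
    · exact key l (by simp at h1 h2 ⊢; omega) id id

-- ===== VERDICT =====
theorem divBy13_spec : Claim_equal_divBy13 := by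
  intro s _ _
  unfold Spec_divBy13
  rw [pvA_char, pvB_char]
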